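-- pv_equiv track=rewrite | github.com/PoroSenok-sys/TestTask_For_Zvonok | Employee_statistics.py | employee_statistics_for_list
-- ===== SOURCE A (Python) =====
-- from typing import List, Dict
--
-- def employee_statistics_for_list(worker_and_hours: List) -> Dict:
--     result = {}
--     for i in worker_and_hours:
--         name = " ".join(i.split(" ")[:-1])
--         hours = i.split(" ")[-1]
--         if name in result:
--             result[name] += ", " + hours
--         else:
--             result[name] = hours
--     return result
-- ===== SOURCE B (Python) =====
-- def employee_statistics_for_list(worker_and_hours):
--     # phase 1: split each entry once into a (name, hours) pair
--     pairs = []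
--     for i in worker_and_hours:
--         parts = i.split(" ")
--         pairs.append((" ".join(parts[:-1]), parts[-1]))
--     # phase 2: the distinct names, in first-occurrence order
--     names = []
--     for n, _ in pairs:
--         if n not in names:
--             names.append(n)
--     # phase 3: for each name, gather all its hours from the full list and join
--     return {n: ", ".join(h for m, h in pairs if m == n) for n in names}
-- ===== Notes on version B (the rewrite author's own statement) =====
-- stated objective: alternative
-- what changed: B never builds the dict incrementally: it splits all entries into (name, hours) pairs, computes the distinct names in first-occurrence order, then for each name filters the full pair list and joins its hours once; A maintains a dict and grows each group's joined string in place with '+=' inside a membership if/else, which is quadratic in a group's size.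
import Mathlib
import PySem

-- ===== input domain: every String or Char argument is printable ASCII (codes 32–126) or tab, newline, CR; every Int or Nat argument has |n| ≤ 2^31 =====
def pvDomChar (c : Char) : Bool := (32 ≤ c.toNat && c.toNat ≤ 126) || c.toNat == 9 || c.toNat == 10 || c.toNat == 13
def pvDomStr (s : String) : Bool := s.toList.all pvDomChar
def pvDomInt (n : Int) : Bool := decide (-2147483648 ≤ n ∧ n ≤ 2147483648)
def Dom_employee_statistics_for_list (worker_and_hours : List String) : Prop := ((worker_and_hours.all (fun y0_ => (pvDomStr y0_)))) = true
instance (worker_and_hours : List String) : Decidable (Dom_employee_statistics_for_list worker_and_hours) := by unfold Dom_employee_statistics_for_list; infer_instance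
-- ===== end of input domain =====

-- B replaces A's single-pass incremental dict of joined strings by a three-phase pipeline: split all entries into pairs, collect the distinct names, then per name filter the pair list and join its hours once (objective: alternative).

-- ===== PORT A =====
-- i.split(" ") has sep " " ≠ "", so split? is always some; .getD [] never fires.
-- parts is always nonempty, so parts[-1] (pyGetD … (-1) "") never falls back to the default.
def employee_statistics_for_list (worker_and_hours : List String) : List (String × String) :=
  (worker_and_hours.foldl (fun result i =>
      let name := PySem.Str.join " " (PySem.List.slice ((PySem.Str.split? i " ").getD []) none (some (-1)))
      let hours := PySem.List.pyGetD ((PySem.Str.split? i " ").getD []) (-1) ""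
      if result.contains name then
        result.insert name (result.getD name "" ++ ", " ++ hours)
      else
        result.insert name hours)
    PySem.Dict.empty).items

-- ===== PORT B =====
-- phase 1 is the append loop over worker_and_hours; phase 2 the membership loop over pairs
-- ('if n not in names: names.append(n)'); phase 3 the dict comprehension with its filtering
-- generator. Same split?/pyGetD remarks as in A.
def employee_statistics_for_list_alt (worker_and_hours : List String) : List (String × String) :=
  let pairs : List (String × String) := worker_and_hours.foldl (fun ps i =>
      let parts := (PySem.Str.split? i " ").getD []
      ps ++ [(PySem.Str.join " " (PySem.List.slice parts none (some (-1))), PySem.List.pyGetD parts (-1) "")]) []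
  let names : List String := pairs.foldl (fun ns p => if ns.contains p.1 then ns else ns ++ [p.1]) []
  names.map (fun n => (n, PySem.Str.join ", " ((pairs.filter (fun p => p.1 == n)).map Prod.snd)))

-- ===== PRECONDITION & SPEC =====
def Spec_employee_statistics_for_list (worker_and_hours : List String) (out : List (String × String)) : Prop := out = employee_statistics_for_list_alt worker_and_hours
instance (worker_and_hours : List String) (out : List (String × String)) : Decidable (Spec_employee_statistics_for_list worker_and_hours out) := by unfold Spec_employee_statistics_for_list; infer_instance

-- ===== CLAIM (what is proved, stated in full; the proofs are below) =====
def Claim_equal_employee_statistics_for_list : Prop := ∀ (worker_and_hours : List String), Dom_employee_statistics_for_list worker_and_hours → Spec_employee_statistics_for_list worker_and_hours (employee_statistics_for_list worker_and_hours)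

-- ===== LEMMAS AND PROOFS =====

-- the (name, hours) pair of one input line
def pvPair (i : String) : String × String :=
  let parts := (PySem.Str.split? i " ").getD []
  (PySem.Str.join " " (PySem.List.slice parts none (some (-1))), PySem.List.pyGetD parts (-1) "")

-- the grouping dict: each name ↦ its list of hours, folded over the pair list
def pvGp (ps : List (String × String)) : PySem.Dict String (List String) :=
  ps.foldl (fun d p => d.modify p.1 [] (fun hs => hs ++ [p.2])) PySem.Dict.empty

-- the same grouping dict folded over the raw lines
def pvG (ws : List String) : PySem.Dict String (List String) :=
  ws.foldl (fun d i => d.modify (pvPair i).1 [] (fun hs => hs ++ [(pvPair i).2])) PySem.Dict.empty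

lemma pvG_eq_pvGp (ws : List String) : pvG ws = pvGp (ws.map pvPair) := by
  unfold pvG pvGp
  rw [List.foldl_map]

-- the formatting phase, as a map over a grouping dict
def pvMapD (d : PySem.Dict String (List String)) : PySem.Dict String String :=
  PySem.Dict.mk (d.items.map (fun p => (p.1, PySem.Str.join ", " p.2)))

lemma pv_get_mapD (d : PySem.Dict String (List String)) (k : String) :
    (pvMapD d).get? k = (d.get? k).map (PySem.Str.join ", ") := by
  simp [pvMapD, PySem.Dict.get?, List.find?_map, Function.comp_def]

lemma pv_contains_mapD (d : PySem.Dict String (List String)) (k : String) :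
    (pvMapD d).contains k = d.contains k := by
  simp [pvMapD, PySem.Dict.contains, List.any_map, Function.comp_def]

lemma pv_chars_join_append (sep y : List Char) (xs : List (List Char)) (hx : xs ≠ []) :
    PySem.Chars.join sep (xs ++ [y]) = PySem.Chars.join sep xs ++ sep ++ y := by
  induction xs with
  | nil => exact absurd rfl hx
  | cons a t ih =>
    cases t with
    | nil => simp [PySem.Chars.join_cons_cons, PySem.Chars.join_singleton]
    | cons b t' =>
      have h2 := ih (by simp)
      calc PySem.Chars.join sep (a :: b :: t' ++ [y])
          = a ++ sep ++ PySem.Chars.join sep ((b :: t') ++ [y]) :=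
            PySem.Chars.join_cons_cons sep a b (t' ++ [y])
        _ = a ++ sep ++ (PySem.Chars.join sep (b :: t') ++ sep ++ y) := by rw [h2]
        _ = PySem.Chars.join sep (a :: b :: t') ++ sep ++ y := by
            rw [PySem.Chars.join_cons_cons sep a b t']; simp [List.append_assoc]

lemma pv_join_append (h : String) (hs : List String) (hx : hs ≠ []) :
    PySem.Str.join ", " (hs ++ [h]) = PySem.Str.join ", " hs ++ ", " ++ h := by
  rw [← String.toList_inj]
  simp only [PySem.Str.toList_join, String.toList_append, List.map_append, List.map_cons,
    List.map_nil]
  exact pv_chars_join_append _ _ _ (by simpa using hx)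

lemma pv_join_singleton (h : String) : PySem.Str.join ", " [h] = h := by
  simp [PySem.Str.join, PySem.Chars.join_singleton, String.ofList_toList]

lemma pv_mapD_insert (d : PySem.Dict String (List String)) (k : String) (v : List String) :
    pvMapD (d.insert k v) = (pvMapD d).insert k (PySem.Str.join ", " v) := by
  simp only [PySem.Dict.insert, pv_contains_mapD]
  split
  · apply PySem.Dict.ext
    simp only [pvMapD, List.map_map]
    apply List.map_congr_left
    intro p _
    by_cases hk : p.1 = k <;> simp [hk]
  · apply PySem.Dict.ext
    simp [pvMapD]

-- one loop step: A's branch on membership equals the grouping modify, through the formatting map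
lemma pv_step (d : PySem.Dict String (List String))
    (hnv : ∀ p ∈ d.items, p.2 ≠ []) (n h : String) :
    (if (pvMapD d).contains n then
      (pvMapD d).insert n ((pvMapD d).getD n "" ++ ", " ++ h)
     else (pvMapD d).insert n h)
    = pvMapD (d.modify n [] (fun hs => hs ++ [h])) := by
  rw [pv_contains_mapD]
  by_cases hc : d.contains n
  · rw [if_pos hc]
    obtain ⟨hs, hhs⟩ : ∃ hs, d.get? n = some hs := by
      rw [PySem.Dict.contains_eq_isSome_get?] at hc
      exact Option.isSome_iff_exists.mp hc
    have hne : hs ≠ [] := hnv _ (PySem.Dict.mem_items_of_get?_eq_some d hhs)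
    have hgd : (pvMapD d).getD n "" = PySem.Str.join ", " hs := by
      apply PySem.Dict.getD_of_get?_eq_some
      rw [pv_get_mapD, hhs]; rfl
    rw [hgd, PySem.Dict.modify, PySem.Dict.getD_of_get?_eq_some d [] hhs,
      pv_mapD_insert, pv_join_append h hs hne]
  · rw [if_neg hc]
    have hgd : d.getD n [] = [] :=
      PySem.Dict.getD_of_not_contains d [] (by simpa using hc)
    rw [PySem.Dict.modify, hgd, pv_mapD_insert]
    simp [pv_join_singleton]

lemma pv_inv_step (d : PySem.Dict String (List String))
    (hnv : ∀ p ∈ d.items, p.2 ≠ []) (n h : String) :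
    ∀ p ∈ (d.modify n [] (fun hs => hs ++ [h])).items, p.2 ≠ [] := by
  intro p hp
  rw [PySem.Dict.modify] at hp
  rcases (PySem.Dict.mem_items_insert _ _ _ _).mp hp with he | ⟨hmem, _⟩
  · subst he; simp
  · exact hnv _ hmem

-- A's whole loop, generalized over the starting dicts
lemma pv_fold (ws : List String) (d : PySem.Dict String (List String))
    (hnv : ∀ p ∈ d.items, p.2 ≠ []) :
    ws.foldl (fun result i =>
      let name := PySem.Str.join " " (PySem.List.slice ((PySem.Str.split? i " ").getD []) none (some (-1)))
      let hours := PySem.List.pyGetD ((PySem.Str.split? i " ").getD []) (-1) ""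
      if result.contains name then
        result.insert name (result.getD name "" ++ ", " ++ hours)
      else
        result.insert name hours) (pvMapD d)
    = pvMapD (ws.foldl (fun d i => d.modify (pvPair i).1 [] (fun hs => hs ++ [(pvPair i).2])) d) := by
  induction ws generalizing d with
  | nil => rfl
  | cons i t ih =>
    simp only [List.foldl_cons]
    rw [pv_step d hnv (PySem.Str.join " " (PySem.List.slice ((PySem.Str.split? i " ").getD []) none (some (-1))))
      (PySem.List.pyGetD ((PySem.Str.split? i " ").getD []) (-1) "")]
    exact ih _ (pv_inv_step d hnv (pvPair i).1 (pvPair i).2)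

-- A computes the formatting map of the grouping dict
lemma pvA_eq (ws : List String) :
    employee_statistics_for_list ws = (pvMapD (pvG ws)).items := by
  unfold employee_statistics_for_list pvG
  have h0 : (PySem.Dict.empty : PySem.Dict String String) = pvMapD PySem.Dict.empty := rfl
  rw [h0, pv_fold ws PySem.Dict.empty (by simp [PySem.Dict.empty])]

-- B's phase 1 append loop builds exactly the pair list
lemma pvB_pairs (ws : List String) :
    ws.foldl (fun ps i =>
      let parts := (PySem.Str.split? i " ").getD []
      ps ++ [(PySem.Str.join " " (PySem.List.slice parts none (some (-1))), PySem.List.pyGetD parts (-1) "")]) []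
    = ws.map pvPair := by
  have : ∀ acc : List (String × String), ws.foldl (fun ps i =>
      ps ++ [pvPair i]) acc = acc ++ ws.map pvPair := by
    induction ws with
    | nil => simp
    | cons a t ih => intro acc; simp [ih]
  simpa using this []

-- B's phase 2 membership loop is first-occurrence dedup, i.e. PySem.Set.update
lemma pvB_names (ps : List (String × String)) :
    ps.foldl (fun ns p => if ns.contains p.1 then ns else ns ++ [p.1]) []
    = PySem.Set.update [] (ps.map Prod.fst) := by
  rw [PySem.Set.update_map_eq_foldl_add (f := Prod.fst)]
  have hf : (fun (ns : List String) (p : String × String) =>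
      if ns.contains p.1 then ns else ns ++ [p.1])
      = (fun ns p => PySem.Set.add ns p.1) := by
    funext ns p
    simp [PySem.Set.add]
  rw [hf]

-- the grouping dict's items, characterized: distinct names, each with its filtered hours
lemma pvGp_items (ps : List (String × String)) :
    (pvGp ps).items
    = (PySem.Set.update [] (ps.map Prod.fst)).map
        (fun n => (n, (ps.filter (fun p => p.1 == n)).map Prod.snd)) := by
  have hnd : (pvGp ps).keys.Nodup := by
    unfold pvGp
    exact PySem.Dict.nodup_keys_foldl_modify_key ps Prod.fst [] (fun d p => fun hs => hs ++ [p.2])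
      PySem.Dict.empty (by simp [PySem.Dict.empty, PySem.Dict.keys])
  rw [PySem.Dict.items_eq_map_keys (pvGp ps) hnd []]
  have hkeys : (pvGp ps).keys = PySem.Set.update [] (ps.map Prod.fst) := by
    unfold pvGp
    rw [PySem.Dict.keys_foldl_modify_key]
    simp [PySem.Dict.empty, PySem.Dict.keys]
  rw [hkeys]
  apply List.map_congr_left
  intro n _
  have := PySem.Dict.getD_foldl_modify_append (l := ps) (d := PySem.Dict.empty) (c := n)
  unfold pvGp
  rw [this]
  rfl

-- ===== VERDICT (by name: the statement is the Claim_ definition above) =====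
theorem employee_statistics_for_list_spec : Claim_equal_employee_statistics_for_list := by
  intro ws _
  show employee_statistics_for_list ws = employee_statistics_for_list_alt ws
  rw [pvA_eq, pvG_eq_pvGp]
  unfold employee_statistics_for_list_alt
  simp only []
  rw [pvB_pairs, pvB_names, pvMapD, pvGp_items]
  simp [List.map_map, Function.comp_def]
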